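-- pv_equiv track=rewrite | github.com/Orwoong/algorithm | 4th_week/4-2.py | greedy_meeting
-- ===== SOURCE A (Python) =====
-- def greedy_meeting(list):
--     max_meeting = 0
--
--     for i in range(len(list)):
--         end = list[i][1]
--         meeting_count = 1
--         for j in range(i+1,len(list)):
--             if list[j][0] >= end:
--                 meeting_count += 1
--                 end = list[j][1]
--         max_meeting = max(max_meeting, meeting_count)
--
--     return max_meeting
-- ===== SOURCE B (Python) =====
-- def greedy_meeting(list):
--     # memoized DP: chain length at each position = 1 + chain at first
--     # later meeting whose start >= this meeting's end (1 if none)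
--     table = []  # [(meeting, chain_len)] for the suffix already processed, in original order
--     for x in reversed(list):
--         val = 1
--         for y, gy in table:
--             if y[0] >= x[1]:
--                 val = 1 + gy
--                 break
--         table = [(x, val)] + table
--     best = 0
--     for _, g in table:
--         best = max(best, g)
--     return best
-- ===== Notes on version B (the rewrite author's own statement) =====
-- stated objective: faster
-- what changed: Replaces A's fresh full greedy rescan from every start index with a right-to-left memoized DP: chain length at position i is 1 + chain length of the first later meeting whose start >= end_i (found with an early break), then the maximum is taken.
import Mathlib
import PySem

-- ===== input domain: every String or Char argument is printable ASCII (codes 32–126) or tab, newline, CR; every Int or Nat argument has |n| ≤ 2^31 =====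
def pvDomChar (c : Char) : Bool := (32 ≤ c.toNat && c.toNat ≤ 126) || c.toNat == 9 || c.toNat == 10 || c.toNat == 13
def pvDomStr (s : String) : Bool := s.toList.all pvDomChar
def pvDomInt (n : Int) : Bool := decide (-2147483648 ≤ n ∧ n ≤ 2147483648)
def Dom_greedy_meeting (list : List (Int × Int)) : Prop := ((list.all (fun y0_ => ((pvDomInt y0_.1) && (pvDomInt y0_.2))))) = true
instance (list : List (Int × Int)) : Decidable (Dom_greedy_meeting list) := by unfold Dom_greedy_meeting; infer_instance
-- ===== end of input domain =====

-- B replaces A's fresh greedy rescan from every start index with a right-to-left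
-- memoized DP reusing chain lengths with an early-break lookup (objective: faster; measured).

-- ===== PORT A =====
-- outer loop over i; inner loop state is (end, meeting_count)
def greedy_meeting (list : List (Int × Int)) : Int :=
  (PySem.List.pyRange 0 (PySem.List.len list) 1).foldl
    (fun max_meeting i =>
      let e := (PySem.List.pyGetD list i (0, 0)).2
      let st :=
        (PySem.List.pyRange (i + 1) (PySem.List.len list) 1).foldl
          (fun (s : Int × Int) j =>
            let x := PySem.List.pyGetD list j (0, 0)
            if x.1 ≥ s.1 then (x.2, s.2 + 1) else s)
          (e, 1)
      max max_meeting st.2)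
    0

-- ===== PORT B =====
-- 'for y, gy in table: if y[0] >= x[1]: val = 1 + gy; break' (val = 1 if no match)
def firstChain (e : Int) : List ((Int × Int) × Int) → Int
  | [] => 1
  | (y, gy) :: t => if y.1 ≥ e then 1 + gy else firstChain e t

-- the 'for x in reversed(list): … table = [(x, val)] + table' loop, as structural recursion
def gTable : List (Int × Int) → List ((Int × Int) × Int)
  | [] => []
  | x :: xs =>
    let t := gTable xs
    (x, firstChain x.2 t) :: t

def greedy_meeting_alt (list : List (Int × Int)) : Int :=
  (gTable list).foldl (fun best p => max best p.2) 0

-- ===== PRECONDITION & SPEC =====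
def Spec_greedy_meeting (list : List (Int × Int)) (out : Int) : Prop := out = greedy_meeting_alt list
instance (list : List (Int × Int)) (out : Int) : Decidable (Spec_greedy_meeting list out) := by unfold Spec_greedy_meeting; infer_instance

-- ===== CLAIM (what is proved, stated in full; the proofs are below) =====
def Claim_equal_greedy_meeting : Prop := ∀ (list : List (Int × Int)), Dom_greedy_meeting list → Spec_greedy_meeting list (greedy_meeting list)

-- ===== LEMMAS AND PROOFS =====

-- length of A's greedy chain through xs starting with current end e (count already 1)
def cnt (e : Int) : List (Int × Int) → Int
  | [] => 1
  | y :: xs => if y.1 ≥ e then 1 + cnt y.2 xs else cnt e xs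

-- A's inner fold computes cnt
lemma inner_eq_cnt (xs : List (Int × Int)) : ∀ (e c : Int),
    (xs.foldl (fun (s : Int × Int) (y : Int × Int) =>
        if y.1 ≥ s.1 then (y.2, s.2 + 1) else s) (e, c)).2 = c - 1 + cnt e xs := by
  induction xs with
  | nil => intro e c; simp [cnt]
  | cons y xs ih =>
    intro e c
    simp only [List.foldl_cons, cnt]
    by_cases h : y.1 ≥ e
    · simp [h, ih]; ring
    · simp [h, ih]

-- the list of A's per-start counts
def counts : List (Int × Int) → List Int
  | [] => []
  | x :: xs => cnt x.2 xs :: counts xs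

lemma range_map_eq_counts (lst : List (Int × Int)) :
    (List.range lst.length).map
      (fun k => cnt (lst.getD k (0, 0)).2 (lst.drop (k + 1))) = counts lst := by
  induction lst with
  | nil => simp [counts]
  | cons x xs ih =>
    simp only [List.length_cons, List.range_succ_eq_map, List.map_cons, List.map_map, counts]
    refine congrArg₂ _ (by simp) ?_
    rw [← ih]
    apply List.map_congr_left
    intro k _
    simp [List.getD]

lemma greedy_eq_counts (lst : List (Int × Int)) :
    greedy_meeting lst = (counts lst).foldl max 0 := by
  unfold greedy_meeting
  rw [PySem.List.pyRange_one]
  rw [List.foldl_map]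
  have hstep : ∀ (m : Int) (k : ℕ), k ∈ List.range ((PySem.List.len lst - 0).toNat) →
      (fun (max_meeting : Int) (i : Int) =>
        let e := (PySem.List.pyGetD lst i (0, 0)).2
        let st :=
          (PySem.List.pyRange (i + 1) (PySem.List.len lst) 1).foldl
            (fun (s : Int × Int) j =>
              let x := PySem.List.pyGetD lst j (0, 0)
              if x.1 ≥ s.1 then (x.2, s.2 + 1) else s)
            (e, 1)
        max max_meeting st.2) m ((0 : Int) + k)
      = max m (cnt (lst.getD k (0, 0)).2 (lst.drop (k + 1))) := by
    intro m k hk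
    simp only [List.mem_range, PySem.List.len_eq, Int.sub_zero, Int.toNat_natCast] at hk
    simp only [Int.zero_add]
    have h1 : PySem.List.pyGetD lst (k : Int) (0, 0) = lst.getD k (0, 0) :=
      PySem.List.pyGetD_natCast lst k (0, 0)
    have h2 : ((k : Int) + 1) = ((k + 1 : ℕ) : Int) := by push_cast; ring
    rw [h1, h2, PySem.List.foldl_pyRange_pyGetD lst (0,0)
      (fun (s : Int × Int) (x : Int × Int) => if x.1 ≥ s.1 then (x.2, s.2 + 1) else s)
      _ (by positivity)]
    simp only [Int.toNat_natCast]
    rw [inner_eq_cnt]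
    ring_nf
  calc (List.range (PySem.List.len lst - 0).toNat).foldl _ 0
      = (List.range lst.length).foldl
          (fun m k => max m (cnt (lst.getD k (0, 0)).2 (lst.drop (k + 1)))) 0 := by
        rw [PySem.List.foldl_congr_mem _ _ _ _ hstep]
        simp [PySem.List.len_eq]
    _ = ((List.range lst.length).map
          (fun k => cnt (lst.getD k (0, 0)).2 (lst.drop (k + 1)))).foldl max 0 := by
        rw [List.foldl_map]
    _ = (counts lst).foldl max 0 := by rw [range_map_eq_counts]

lemma firstChain_gTable (xs : List (Int × Int)) : ∀ e, firstChain e (gTable xs) = cnt e xs := by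
  induction xs with
  | nil => intro e; simp [gTable, firstChain, cnt]
  | cons y xs ih =>
    intro e
    simp only [gTable, firstChain, cnt, ih]

lemma alt_eq_counts (lst : List (Int × Int)) :
    greedy_meeting_alt lst = (counts lst).foldl max 0 := by
  unfold greedy_meeting_alt
  have h : (gTable lst).map (·.2) = counts lst := by
    induction lst with
    | nil => simp [gTable, counts]
    | cons x xs ih => simp [gTable, counts, firstChain_gTable, ih]
  rw [← h, ← List.foldl_map]

-- ===== VERDICT (by name: the statement is the Claim_ definition above) =====
theorem greedy_meeting_spec : Claim_equal_greedy_meeting := by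
  intro list _
  unfold Spec_greedy_meeting
  rw [greedy_eq_counts, alt_eq_counts]
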